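-- pv_equiv track=rewrite | github.com/lowkeyarms27/ASC | backend/agents/game_config.py | detect_game
-- ===== SOURCE A (Python) =====
-- def detect_game(vod_filename: str) -> str:
--     """Infer game from VOD filename. Falls back to r6siege."""
--     name = vod_filename.lower()
--     if any(k in name for k in ["valorant", "valo"]):
--         return "valorant"
--     if any(k in name for k in ["csgo", "cs2", "counter"]):
--         return "cs2"
--     if any(k in name for k in ["marvel", "rivals", "marvelrivals"]):
--         return "marvelrivals"
--     if any(k in name for k in ["mlbb", "mobilelegends", "mobile_legends"]):
--         return "mlbb"
--     if any(k in name for k in ["apex"]):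
--         return "apex"
--     if any(k in name for k in ["league", "leagueoflegends"]):
--         return "lol"
--     if any(k in name for k in ["dota", "dota2"]):
--         return "dota2"
--     if any(k in name for k in ["overwatch", "ow2"]):
--         return "overwatch2"
--     return "r6siege"
-- ===== SOURCE B (Python) =====
-- GAME_BY_PRIORITY = ["valorant", "cs2", "marvelrivals", "mlbb", "apex", "lol", "dota2", "overwatch2"]
--
-- KEYWORD_PRIORITY = {
--     "valorant": 0, "valo": 0,
--     "csgo": 1, "cs2": 1, "counter": 1,
--     "marvel": 2, "rivals": 2, "marvelrivals": 2,
--     "mlbb": 3, "mobilelegends": 3, "mobile_legends": 3,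
--     "apex": 4,
--     "league": 5, "leagueoflegends": 5,
--     "dota": 6, "dota2": 6,
--     "overwatch": 7, "ow2": 7,
-- }
--
-- def detect_game(vod_filename: str) -> str:
--     """Infer game from VOD filename: collect every matched keyword's priority, take the best one. Falls back to r6siege."""
--     name = vod_filename.lower()
--     hits = [p for k, p in KEYWORD_PRIORITY.items() if k in name]
--     return GAME_BY_PRIORITY[min(hits)] if hits else "r6siege"
-- ===== Notes on version B (the rewrite author's own statement) =====
-- stated objective: alternative
-- what changed: Instead of A's ordered short-circuiting if-chain of per-game substring checks, B collects the priority of every matched keyword from one flat keyword-to-priority map in a single pass and then picks the best (minimum) priority, indexing a priority-ordered name table.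
import Mathlib
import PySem

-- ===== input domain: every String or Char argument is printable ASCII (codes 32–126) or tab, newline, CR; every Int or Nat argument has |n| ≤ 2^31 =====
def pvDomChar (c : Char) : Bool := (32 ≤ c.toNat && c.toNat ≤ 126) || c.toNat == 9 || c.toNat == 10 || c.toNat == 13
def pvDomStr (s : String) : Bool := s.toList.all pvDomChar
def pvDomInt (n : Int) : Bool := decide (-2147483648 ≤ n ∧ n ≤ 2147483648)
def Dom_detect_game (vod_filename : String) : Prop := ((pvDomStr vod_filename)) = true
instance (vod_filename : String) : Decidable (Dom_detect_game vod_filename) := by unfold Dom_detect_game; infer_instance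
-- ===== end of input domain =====

-- B replaces A's nine-branch short-circuit if-chain by collecting every matched keyword's priority from one flat map and taking the minimum (alternative decomposition, same cost).


-- ===== PORT A =====
def detect_game (vod_filename : String) : String :=
  let name := PySem.Str.lower vod_filename
  if ["valorant", "valo"].any (fun k => PySem.Str.isIn k name) then "valorant"
  else if ["csgo", "cs2", "counter"].any (fun k => PySem.Str.isIn k name) then "cs2"
  else if ["marvel", "rivals", "marvelrivals"].any (fun k => PySem.Str.isIn k name) then "marvelrivals"
  else if ["mlbb", "mobilelegends", "mobile_legends"].any (fun k => PySem.Str.isIn k name) then "mlbb"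
  else if ["apex"].any (fun k => PySem.Str.isIn k name) then "apex"
  else if ["league", "leagueoflegends"].any (fun k => PySem.Str.isIn k name) then "lol"
  else if ["dota", "dota2"].any (fun k => PySem.Str.isIn k name) then "dota2"
  else if ["overwatch", "ow2"].any (fun k => PySem.Str.isIn k name) then "overwatch2"
  else "r6siege"

-- ===== PORT B =====
def gameByPriority : List String :=
  ["valorant", "cs2", "marvelrivals", "mlbb", "apex", "lol", "dota2", "overwatch2"]

def keywordPriority : List (String × Int) :=
  [("valorant", 0), ("valo", 0),
   ("csgo", 1), ("cs2", 1), ("counter", 1),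
   ("marvel", 2), ("rivals", 2), ("marvelrivals", 2),
   ("mlbb", 3), ("mobilelegends", 3), ("mobile_legends", 3),
   ("apex", 4),
   ("league", 5), ("leagueoflegends", 5),
   ("dota", 6), ("dota2", 6),
   ("overwatch", 7), ("ow2", 7)]

def detect_game_alt (vod_filename : String) : String :=
  let name := PySem.Str.lower vod_filename
  let hits := keywordPriority.filterMap
    (fun kp => if PySem.Str.isIn kp.1 name then some kp.2 else none)
  match PySem.List.min? hits (fun p => p) with
  | some m => (PySem.List.pyGet? gameByPriority m).getD "r6siege"  -- index is provably in range; the default is unreachable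
  | none => "r6siege"

-- ===== PRECONDITION & SPEC =====
def Spec_detect_game (vod_filename : String) (out : String) : Prop := out = detect_game_alt vod_filename
instance (vod_filename : String) (out : String) : Decidable (Spec_detect_game vod_filename out) := by unfold Spec_detect_game; infer_instance

-- ===== CLAIM =====
def Claim_equal_detect_game : Prop := ∀ (vod_filename : String), Dom_detect_game vod_filename → Spec_detect_game vod_filename (detect_game vod_filename)

-- ===== LEMMAS AND PROOFS =====

/-- Option-level minimum (none = empty). -/
def omin : Option Int → Option Int → Option Int
  | none, b => b
  | some a, none => some a
  | some a, some b => some (min a b)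

theorem foldl_min_pull (t : List Int) : ∀ (a y : Int),
    t.foldl min (min a y) = min a (t.foldl min y) := by
  induction t with
  | nil => intro a y; rfl
  | cons z t ih =>
    intro a y
    simp only [List.foldl_cons]
    rw [min_assoc, ih]

theorem omin_some_min? (a : Int) (l : List Int) :
    omin (some a) (PySem.List.min? l (fun p => p)) = some (l.foldl min a) := by
  cases l with
  | nil => simp [PySem.List.min?, omin]
  | cons y t =>
    rw [PySem.List.min?_id_cons]
    simp only [omin, List.foldl_cons]
    rw [← foldl_min_pull]

theorem minFM (name : String) (l : List (String × Int)) :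
    PySem.List.min? (l.filterMap (fun kp => if PySem.Str.isIn kp.1 name then some kp.2 else none)) (fun p => p)
      = l.foldr (fun kp r => omin (if PySem.Str.isIn kp.1 name then some kp.2 else none) r) none := by
  induction l with
  | nil => simp [PySem.List.min?]
  | cons kv t ih =>
    cases h : PySem.Str.isIn kv.1 name with
    | false =>
      simp only [List.filterMap_cons, List.foldr_cons, h, Bool.false_eq_true, if_false, omin]
      exact ih
    | true =>
      simp only [List.filterMap_cons, List.foldr_cons, h, if_true]
      rw [← ih, omin_some_min?, PySem.List.min?_id_cons]

/-- Two adjacent tagged entries with the same value collapse to their disjunction. -/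
theorem collapse (a b : Bool) (v : Int) (r : Option Int) :
    omin (if a then some v else none) (omin (if b then some v else none) r)
      = omin (if (a || b) then some v else none) r := by
  cases a <;> cases b <;> cases r <;> simp [omin, min_self]


-- ===== VERDICT =====
theorem detect_game_spec : Claim_equal_detect_game := by
  intro v _
  show detect_game v = detect_game_alt v
  unfold detect_game detect_game_alt
  simp only [List.any_cons, List.any_nil, Bool.or_false, minFM, keywordPriority,
    List.foldr_cons, List.foldr_nil, collapse]
  generalize (PySem.Str.isIn "valorant" (PySem.Str.lower v) || PySem.Str.isIn "valo" (PySem.Str.lower v)) = g1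
  generalize (PySem.Str.isIn "csgo" (PySem.Str.lower v) || (PySem.Str.isIn "cs2" (PySem.Str.lower v) || PySem.Str.isIn "counter" (PySem.Str.lower v))) = g2
  generalize (PySem.Str.isIn "marvel" (PySem.Str.lower v) || (PySem.Str.isIn "rivals" (PySem.Str.lower v) || PySem.Str.isIn "marvelrivals" (PySem.Str.lower v))) = g3
  generalize (PySem.Str.isIn "mlbb" (PySem.Str.lower v) || (PySem.Str.isIn "mobilelegends" (PySem.Str.lower v) || PySem.Str.isIn "mobile_legends" (PySem.Str.lower v))) = g4
  generalize (PySem.Str.isIn "apex" (PySem.Str.lower v)) = g5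
  generalize (PySem.Str.isIn "league" (PySem.Str.lower v) || PySem.Str.isIn "leagueoflegends" (PySem.Str.lower v)) = g6
  generalize (PySem.Str.isIn "dota" (PySem.Str.lower v) || PySem.Str.isIn "dota2" (PySem.Str.lower v)) = g7
  generalize (PySem.Str.isIn "overwatch" (PySem.Str.lower v) || PySem.Str.isIn "ow2" (PySem.Str.lower v)) = g8
  cases g1 <;> cases g2 <;> cases g3 <;> cases g4 <;> cases g5 <;> cases g6 <;> cases g7 <;> cases g8 <;> rfl
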